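-- pv_equiv track=rewrite | github.com/wencenlin/nodule_cls | searchspace/search_space_utils.py | get_search_space
-- ===== SOURCE A (Python) =====
-- def get_search_space(max_len, channel_range, search_space=[], now=0):
--     """
--     Recursive.
--     Get all configuration combinations
--
--     :param max_len: max of the depth of model
--     :param channel_range: list, the range of channel
--     :param search_space: search space
--     :param now: depth of model
--     :return:
--     """
--     result = []
--     if now == 0:
--         for i in channel_range:
--             result.append([i])
--         # [[4], [8], [16], [32], [64], [128]]
--     else:
--         for i in search_space:
--             larger_channel = get_larger_channel(channel_range, i[-1])  # channel_num: 4 ,result: [4, 8, 16, 32, 64, 128]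
--             for m in larger_channel:  # when larger_channel = [4, 8, 16, 32, 64, 128], i = [4]
--                 tmp = i.copy()      # [4].    | [4].
--                 tmp.append(m)       # [4,4].  | [4,8].
--                 result.append(tmp)  # [[4,4]].| [[4,4], [4,8]].
--         # [[4, 4], [4, 8], [4, 16], [4, 32], [4, 64], [4, 128], ..., [32, 32], [32, 64], [32, 128], [64, 64], [64, 128], [128, 128]]
--         # [[4, 4, 4], [4, 4, 8], ..., [4, 4, 128], [4, 8, 8], ..., [4, 8, 128], ..., [4, 128, 128], ..., [32, 32, 32], [32, 32, 64], [32, 32, 128], ..., [64, 128, 128], [128, 128, 128]]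
--     now = now + 1
--     if now < max_len:
--         return get_search_space(max_len, channel_range, search_space=result, now=now)
--     else:
--         return result
--
-- def get_larger_channel(channel_range, channel_num):
--     """
--     get channels which is larger than inputs
--
--     :param channel_range: list,channel range
--     :param channel_num: input channel
--     :return: list,channels which is larger than inputs
--     """
--     # channel_num: 4 ,result: [4, 8, 16, 32, 64, 128]
--     # channel_num: 8 ,result:    [8, 16, 32, 64, 128]
--     result = filter(lambda x: x >= channel_num, channel_range)
--     return list(result)
-- ===== SOURCE B (Python) =====
-- def get_search_space(max_len, channel_range, search_space=[], now=0):
--     # Iterative: seed (or do A's unconditional first extension), then extend while now < max_len.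
--     if now == 0:
--         result = [[c] for c in channel_range]
--     else:
--         result = [seq + [c] for seq in search_space for c in channel_range if c >= seq[-1]]
--     now += 1
--     while now < max_len:
--         result = [seq + [c] for seq in result for c in channel_range if c >= seq[-1]]
--         now += 1
--     return result
-- ===== Notes on version B (the rewrite author's own statement) =====
-- stated objective: simpler
-- what changed: Replaces A's tail recursion with helper-calls and an accumulating foldl per level by a single iterative while-loop over a flat list comprehension per level (seed or extend once, then extend while now < max_len).
-- outside the precondition, e.g. on get_search_space(3, [1, 2], [[5]], -1): A returns [[1, 1, 1], [1, 1, 2], [1, 2, 2], [2, 2, 2]], B returns []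
import Mathlib
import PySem

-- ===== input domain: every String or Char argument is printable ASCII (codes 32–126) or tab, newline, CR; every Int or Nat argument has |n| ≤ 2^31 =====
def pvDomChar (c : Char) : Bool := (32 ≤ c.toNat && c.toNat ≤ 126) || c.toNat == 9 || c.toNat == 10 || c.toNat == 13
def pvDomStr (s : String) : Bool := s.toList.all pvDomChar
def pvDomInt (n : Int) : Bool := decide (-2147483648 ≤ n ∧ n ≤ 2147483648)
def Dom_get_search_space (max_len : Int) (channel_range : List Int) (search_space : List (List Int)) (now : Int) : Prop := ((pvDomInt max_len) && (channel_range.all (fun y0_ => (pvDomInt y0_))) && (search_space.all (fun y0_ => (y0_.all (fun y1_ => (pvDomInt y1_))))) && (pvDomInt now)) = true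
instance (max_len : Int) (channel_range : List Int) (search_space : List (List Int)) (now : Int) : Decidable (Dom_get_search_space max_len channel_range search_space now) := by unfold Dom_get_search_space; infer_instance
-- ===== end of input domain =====

-- B replaces A's tail recursion (with a helper and per-level accumulating appends) by a single
-- iterative while-loop over a flat per-level comprehension; same cost, simpler shape.
-- ===== PORT A =====
def get_larger_channel (channel_range : List Int) (channel_num : Int) : List Int :=
  channel_range.filter (fun x => decide (channel_num ≤ x))

def get_search_space (max_len : Int) (channel_range : List Int) (search_space : List (List Int)) (now : Int) : List (List Int) :=
  let result : List (List Int) :=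
    if now = 0 then
      channel_range.foldl (fun acc i => acc ++ [[i]]) []
    else
      search_space.foldl (fun acc i =>
        let larger := get_larger_channel channel_range ((PySem.List.pyGet? i (-1)).getD 0)
        larger.foldl (fun acc2 m => acc2 ++ [i ++ [m]]) acc) []
  let now2 := now + 1
  if now2 < max_len then get_search_space max_len channel_range result now2 else result
termination_by (max_len - now).toNat
decreasing_by omega

-- ===== PORT B =====
def gss_extend (channel_range : List Int) (result : List (List Int)) : List (List Int) :=
  result.flatMap (fun seq =>
    (channel_range.filter (fun c => decide ((PySem.List.pyGet? seq (-1)).getD 0 ≤ c))).map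
      (fun c => seq ++ [c]))

def gss_loop (max_len : Int) (channel_range : List Int) (result : List (List Int)) (now : Int) : List (List Int) :=
  if now < max_len then gss_loop max_len channel_range (gss_extend channel_range result) (now + 1)
  else result
termination_by (max_len - now).toNat
decreasing_by omega

def get_search_space_alt (max_len : Int) (channel_range : List Int) (search_space : List (List Int)) (now : Int) : List (List Int) :=
  let result : List (List Int) :=
    if now = 0 then channel_range.map (fun c => [c])
    else gss_extend channel_range search_space
  gss_loop max_len channel_range result (now + 1)

-- ===== PRECONDITION & SPEC =====
-- Pre_ restricts to the natural domain: now is a recursion depth (0 ≤ now; for negative now A's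
-- counter passes 0 mid-recursion and A discards the accumulated extensions), and for now ≠ 0 every
-- sequence in search_space must be nonempty (on an empty sequence A raises IndexError at i[-1]).
def Pre_get_search_space (max_len : Int) (channel_range : List Int) (search_space : List (List Int)) (now : Int) : Prop :=
  0 ≤ now ∧ (now = 0 ∨ ∀ s ∈ search_space, s ≠ ([] : List Int))
instance (max_len : Int) (channel_range : List Int) (search_space : List (List Int)) (now : Int) : Decidable (Pre_get_search_space max_len channel_range search_space now) := by unfold Pre_get_search_space; infer_instance

def pvWitness_get_search_space : Int × List Int × List (List Int) × Int := (3, [4, 8], [], 0)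

def Spec_get_search_space (max_len : Int) (channel_range : List Int) (search_space : List (List Int)) (now : Int) (out : List (List Int)) : Prop := out = get_search_space_alt max_len channel_range search_space now
instance (max_len : Int) (channel_range : List Int) (search_space : List (List Int)) (now : Int) (out : List (List Int)) : Decidable (Spec_get_search_space max_len channel_range search_space now out) := by unfold Spec_get_search_space; infer_instance

-- ===== CLAIM (what is proved, stated in full; the proofs are below) =====
def Claim_equal_get_search_space : Prop := ∀ (max_len : Int) (channel_range : List Int) (search_space : List (List Int)) (now : Int), Dom_get_search_space max_len channel_range search_space now → Pre_get_search_space max_len channel_range search_space now → Spec_get_search_space max_len channel_range search_space now (get_search_space max_len channel_range search_space now)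

-- ===== LEMMAS AND PROOFS =====

-- A's per-level accumulating double foldl equals B's flat flatMap extension.
theorem stepA_eq_extend (channel_range : List Int) (ss : List (List Int)) :
    ss.foldl (fun acc i =>
      let larger := get_larger_channel channel_range ((PySem.List.pyGet? i (-1)).getD 0)
      larger.foldl (fun acc2 m => acc2 ++ [i ++ [m]]) acc) [] = gss_extend channel_range ss := by
  have h : ∀ (acc : List (List Int)), ss.foldl (fun acc i =>
      let larger := get_larger_channel channel_range ((PySem.List.pyGet? i (-1)).getD 0)
      larger.foldl (fun acc2 m => acc2 ++ [i ++ [m]]) acc) acc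
      = acc ++ gss_extend channel_range ss := by
    intro acc
    have : ∀ (acc : List (List Int)), ss.foldl (fun acc i =>
        (get_larger_channel channel_range ((PySem.List.pyGet? i (-1)).getD 0)).foldl
          (fun acc2 m => acc2 ++ [i ++ [m]]) acc) acc
        = ss.foldl (fun acc i => acc ++
            ((get_larger_channel channel_range ((PySem.List.pyGet? i (-1)).getD 0)).map
              (fun m => i ++ [m]))) acc := by
      intro acc
      apply PySem.List.foldl_congr_mem
      intro acc i _
      exact PySem.List.foldl_append_singleton_eq_map (f := fun m => i ++ [m]) _ _
    rw [this, PySem.List.foldl_append_eq_flatMap]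
    simp only [gss_extend, get_larger_channel]
  simpa using h []

theorem main_loop (max_len : Int) (channel_range : List Int) :
    ∀ (ss : List (List Int)) (now : Int), 0 < now →
      get_search_space max_len channel_range ss now
        = gss_loop max_len channel_range (gss_extend channel_range ss) (now + 1) := by
  intro ss now hpos
  have hm : ∀ n (ss : List (List Int)) (now : Int), (max_len - now).toNat = n → 0 < now →
      get_search_space max_len channel_range ss now
        = gss_loop max_len channel_range (gss_extend channel_range ss) (now + 1) := by
    intro n
    induction n using Nat.strong_induction_on with
    | _ n ih =>
      intro ss now hn hpos
      rw [get_search_space.eq_def]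
      have hnz : ¬ now = 0 := by omega
      simp only [hnz, if_false]
      rw [stepA_eq_extend]
      by_cases hlt : now + 1 < max_len
      · simp only [hlt, if_true]
        rw [ih (max_len - (now + 1)).toNat (by omega) _ _ rfl (by omega)]
        conv_rhs => rw [gss_loop.eq_def]
        simp [hlt]
      · simp only [hlt, if_false]
        conv_rhs => rw [gss_loop.eq_def]
        simp [hlt]
  exact hm _ ss now rfl hpos

-- ===== VERDICT (by name: the statement is the Claim_ definition above) =====
theorem get_search_space_spec : Claim_equal_get_search_space := by
  intro max_len channel_range search_space now _ hpre
  unfold Spec_get_search_space get_search_space_alt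
  rcases hpre with ⟨hnn, _⟩
  by_cases h0 : now = 0
  · subst h0
    rw [get_search_space.eq_def]
    simp only [if_true, PySem.List.foldl_append_singleton_eq_map, List.nil_append]
    by_cases hlt : (0 : Int) + 1 < max_len
    · simp only [hlt, if_true]
      rw [main_loop max_len channel_range _ _ (by omega)]
      conv_rhs => rw [gss_loop.eq_def]
      rw [if_pos hlt]
    · simp only [hlt, if_false]
      conv_rhs => rw [gss_loop.eq_def]
      simp only [hlt, if_false]
  · simp only [h0, if_false]
    exact main_loop max_len channel_range search_space now (by omega)
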